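-- pv_equiv track=rewrite | github.com/kulatharv/AstroLogic-Vedic | astro_engine/domain_engine.py | _functional_nature
-- ===== SOURCE A (Python) =====
-- RASHI = ["Mesha","Vrishabha","Mithuna","Karka","Simha","Kanya",
--          "Tula","Vrischika","Dhanu","Makara","Kumbha","Meena"]
--
-- SIGN_LORDS = {
--     "Mesha":"Mars","Vrishabha":"Venus","Mithuna":"Mercury","Karka":"Moon",
--     "Simha":"Sun","Kanya":"Mercury","Tula":"Venus","Vrischika":"Mars",
--     "Dhanu":"Jupiter","Makara":"Saturn","Kumbha":"Saturn","Meena":"Jupiter"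
-- }
--
-- NATURAL_NATURE = {
--     "Jupiter":2,"Venus":2,"Moon":1,"Mercury":0.5,
--     "Sun":0,"Mars":-1,"Saturn":-2,"Rahu":-1,"Ketu":-1
-- }
--
-- def _functional_nature(lagna_idx: int) -> dict:
--     """
--     Returns dict {planet: score} where:
--       +2 = strong functional benefic (trikona lord)
--       +1 = mild functional benefic (kendra lord, yogakaraka)
--        0 = neutral
--       -1 = mild functional malefic
--       -2 = strong functional malefic (8th/12th lord)
--     """
--     fn = {}
--     for h in range(1, 13):
--         sign = RASHI[(lagna_idx + h - 1) % 12]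
--         lord = SIGN_LORDS[sign]
--         # A planet can rule two houses — take the better one
--         existing = fn.get(lord, 0)
--         if h in (1, 5, 9):
--             fn[lord] = max(existing, 2)
--         elif h == 8:
--             fn[lord] = min(existing, -2)
--         elif h in (6, 12):
--             fn[lord] = min(existing, -1)
--         elif h in (4, 7, 10):  # kendra
--             if existing == 0:
--                 fn[lord] = 1
--         else:
--             if existing == 0:
--                 fn[lord] = 0
--
--     # Special: if a natural malefic lords both a kendra and trikona → Yogakaraka (+3)
--     for h1 in (1, 5, 9):
--         lord1 = SIGN_LORDS[RASHI[(lagna_idx + h1 - 1) % 12]]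
--         for h2 in (4, 7, 10):
--             lord2 = SIGN_LORDS[RASHI[(lagna_idx + h2 - 1) % 12]]
--             if lord1 == lord2 and NATURAL_NATURE.get(lord1, 0) < 0:
--                 fn[lord1] = 3  # Yogakaraka
--
--     return fn
-- ===== SOURCE B (Python) =====
-- RASHI = ["Mesha","Vrishabha","Mithuna","Karka","Simha","Kanya",
--          "Tula","Vrischika","Dhanu","Makara","Kumbha","Meena"]
--
-- SIGN_LORDS = {
--     "Mesha":"Mars","Vrishabha":"Venus","Mithuna":"Mercury","Karka":"Moon",
--     "Simha":"Sun","Kanya":"Mercury","Tula":"Venus","Vrischika":"Mars",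
--     "Dhanu":"Jupiter","Makara":"Saturn","Kumbha":"Saturn","Meena":"Jupiter"
-- }
--
-- NATURAL_NATURE = {
--     "Jupiter":2,"Venus":2,"Moon":1,"Mercury":0.5,
--     "Sun":0,"Mars":-1,"Saturn":-2,"Rahu":-1,"Ketu":-1
-- }
--
-- def _score_of_house(score, h):
--     if h in (1, 5, 9):
--         return max(score, 2)
--     if h == 8:
--         return min(score, -2)
--     if h in (6, 12):
--         return min(score, -1)
--     # kendra (4,7,10) gives 1, other neutral houses give 0 — only if nothing set yet
--     return (1 if h in (4, 7, 10) else 0) if score == 0 else score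
--
-- def _functional_nature(lagna_idx: int) -> dict:
--     # index phase: lord -> ascending list of houses it rules
--     houses = {}
--     for h in range(1, 13):
--         lord = SIGN_LORDS[RASHI[(lagna_idx + h - 1) % 12]]
--         houses.setdefault(lord, []).append(h)
--     # reduce phase: fold each lord's houses (ascending) with the per-house rule
--     fn = {}
--     for lord, hs in houses.items():
--         score = 0
--         for h in hs:
--             score = _score_of_house(score, h)
--         fn[lord] = score
--     # yogakaraka: natural malefic ruling both a trikona and a kendra
--     trikona_lords = {SIGN_LORDS[RASHI[(lagna_idx + h - 1) % 12]] for h in (1, 5, 9)}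
--     kendra_lords = {SIGN_LORDS[RASHI[(lagna_idx + h - 1) % 12]] for h in (4, 7, 10)}
--     for lord in fn:
--         if lord in trikona_lords and lord in kendra_lords and NATURAL_NATURE.get(lord, 0) < 0:
--             fn[lord] = 3
--     return fn
-- ===== Notes on version B (the rewrite author's own statement) =====
-- stated objective: alternative
-- what changed: A's single incremental scan updating a score dict house-by-house is replaced by an index-then-reduce decomposition: first group houses 1..12 by their sign-lord into a dict of ascending house lists, then fold each lord's house list with a pure per-house scoring function, plus a set-membership yogakaraka pass instead of the nested house-pair loop.
import Mathlib
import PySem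

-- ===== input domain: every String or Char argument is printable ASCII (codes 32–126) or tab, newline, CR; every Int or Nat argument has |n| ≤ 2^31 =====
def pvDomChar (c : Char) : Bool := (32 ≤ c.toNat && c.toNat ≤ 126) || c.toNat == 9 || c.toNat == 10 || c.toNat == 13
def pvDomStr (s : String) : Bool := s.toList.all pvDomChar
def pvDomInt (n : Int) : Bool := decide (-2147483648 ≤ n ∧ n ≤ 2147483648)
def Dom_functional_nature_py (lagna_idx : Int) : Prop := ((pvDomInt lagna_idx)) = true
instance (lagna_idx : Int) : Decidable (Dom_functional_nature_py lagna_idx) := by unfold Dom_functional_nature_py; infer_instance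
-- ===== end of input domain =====

-- B replaces A's single incremental dict scan by an index-then-reduce decomposition
-- (group houses by lord, then fold each lord's houses); alternative decomposition, same cost.

-- shared module constants
def pvRASHI : List String :=
  ["Mesha","Vrishabha","Mithuna","Karka","Simha","Kanya",
   "Tula","Vrischika","Dhanu","Makara","Kumbha","Meena"]

def pvSIGN_LORDS : PySem.Dict String String := PySem.Dict.ofList
  [("Mesha","Mars"),("Vrishabha","Venus"),("Mithuna","Mercury"),("Karka","Moon"),
   ("Simha","Sun"),("Kanya","Mercury"),("Tula","Venus"),("Vrischika","Mars"),
   ("Dhanu","Jupiter"),("Makara","Saturn"),("Kumbha","Saturn"),("Meena","Jupiter")]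

-- NATURAL_NATURE has the float value 0.5 for Mercury; the programs only read its SIGN
-- (via `< 0`), so storing every value DOUBLED as an Int is exact here.
def pvNATURAL_NATURE2 : PySem.Dict String Int := PySem.Dict.ofList
  [("Jupiter",4),("Venus",4),("Moon",2),("Mercury",1),
   ("Sun",0),("Mars",-2),("Saturn",-4),("Rahu",-2),("Ketu",-2)]

-- SIGN_LORDS[RASHI[(lagna_idx + h - 1) % 12]]  (index always in range, lookup always hits)
def pvLordAt (lagna_idx h : Int) : String :=
  (PySem.Dict.get? pvSIGN_LORDS
    ((PySem.List.pyGet? pvRASHI (PySem.Int.mod (lagna_idx + h - 1) 12)).getD "")).getD ""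

-- ===== PORT A =====
def functional_nature_py (lagna_idx : Int) : List (String × Int) :=
  let fn : PySem.Dict String Int :=
    (PySem.List.pyRange 1 13 1).foldl (fun fn h =>
      let lord := pvLordAt lagna_idx h
      let existing := fn.getD lord 0
      if h = 1 ∨ h = 5 ∨ h = 9 then fn.insert lord (max existing 2)
      else if h = 8 then fn.insert lord (min existing (-2))
      else if h = 6 ∨ h = 12 then fn.insert lord (min existing (-1))
      else if h = 4 ∨ h = 7 ∨ h = 10 then
        (if existing = 0 then fn.insert lord 1 else fn)
      else (if existing = 0 then fn.insert lord 0 else fn))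
      PySem.Dict.empty
  let fn2 :=
    [(1:Int),5,9].foldl (fun fn h1 =>
      let lord1 := pvLordAt lagna_idx h1
      [(4:Int),7,10].foldl (fun fn h2 =>
        let lord2 := pvLordAt lagna_idx h2
        if lord1 = lord2 ∧ PySem.Dict.getD pvNATURAL_NATURE2 lord1 0 < 0
        then fn.insert lord1 3 else fn)
        fn)
      fn
  fn2.items

-- ===== PORT B =====
def pvScoreOfHouse (score h : Int) : Int :=
  if h = 1 ∨ h = 5 ∨ h = 9 then max score 2
  else if h = 8 then min score (-2)
  else if h = 6 ∨ h = 12 then min score (-1)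
  else if score = 0 then (if h = 4 ∨ h = 7 ∨ h = 10 then 1 else 0) else score

def functional_nature_py_alt (lagna_idx : Int) : List (String × Int) :=
  let houses : PySem.Dict String (List Int) :=
    (PySem.List.pyRange 1 13 1).foldl (fun d h =>
      d.modify (pvLordAt lagna_idx h) [] (· ++ [h])) PySem.Dict.empty
  let fn : PySem.Dict String Int :=
    houses.items.foldl (fun fn p => fn.insert p.1 (p.2.foldl pvScoreOfHouse 0))
      PySem.Dict.empty
  let trikona := PySem.Set.ofList ([(1:Int),5,9].map (fun h => pvLordAt lagna_idx h))
  let kendra := PySem.Set.ofList ([(4:Int),7,10].map (fun h => pvLordAt lagna_idx h))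
  let fn2 := fn.keys.foldl (fun fn lord =>
      if lord ∈ trikona ∧ lord ∈ kendra ∧ PySem.Dict.getD pvNATURAL_NATURE2 lord 0 < 0
      then fn.insert lord 3 else fn) fn
  fn2.items

-- ===== PRECONDITION & SPEC =====
def Spec_functional_nature_py (lagna_idx : Int) (out : List (String × Int)) : Prop := out = functional_nature_py_alt lagna_idx
instance (lagna_idx : Int) (out : List (String × Int)) : Decidable (Spec_functional_nature_py lagna_idx out) := by unfold Spec_functional_nature_py; infer_instance

-- ===== CLAIM (what is proved, stated in full; the proofs are below) =====
def Claim_equal_functional_nature_py : Prop := ∀ (lagna_idx : Int), Dom_functional_nature_py lagna_idx → Spec_functional_nature_py lagna_idx (functional_nature_py lagna_idx)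

-- ===== LEMMAS AND PROOFS =====

-- same body as pvLordAt under another name, so the mod-12 reduction below cannot loop
def pvLordAtR (r h : Int) : String :=
  (PySem.Dict.get? pvSIGN_LORDS
    ((PySem.List.pyGet? pvRASHI (PySem.Int.mod (r + h - 1) 12)).getD "")).getD ""

theorem pvLordAt_eq (l h : Int) : pvLordAt l h = pvLordAtR (l % 12) h := by
  unfold pvLordAt pvLordAtR
  have : PySem.Int.mod (l + h - 1) 12 = PySem.Int.mod (l % 12 + h - 1) 12 := by
    rw [PySem.Int.mod_eq_emod_of_pos (by norm_num),
        PySem.Int.mod_eq_emod_of_pos (by norm_num)]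
    omega
  rw [this]

theorem portA_mod (l : Int) : functional_nature_py l = functional_nature_py (l % 12) := by
  unfold functional_nature_py
  simp only [pvLordAt_eq, Int.emod_emod_of_dvd _ (dvd_refl (12:Int))]

theorem portB_mod (l : Int) :
    functional_nature_py_alt l = functional_nature_py_alt (l % 12) := by
  unfold functional_nature_py_alt
  simp only [pvLordAt_eq, Int.emod_emod_of_dvd _ (dvd_refl (12:Int))]

-- ===== VERDICT (by name: the statement is the Claim_ definition above) =====
theorem functional_nature_py_spec : Claim_equal_functional_nature_py := by
  intro l _
  unfold Spec_functional_nature_py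
  rw [portA_mod, portB_mod]
  have h0 : 0 ≤ l % 12 := Int.emod_nonneg _ (by norm_num)
  have h1 : l % 12 < 12 := Int.emod_lt_of_pos _ (by norm_num)
  have hc : l % 12 = 0 ∨ l % 12 = 1 ∨ l % 12 = 2 ∨ l % 12 = 3 ∨ l % 12 = 4 ∨
      l % 12 = 5 ∨ l % 12 = 6 ∨ l % 12 = 7 ∨ l % 12 = 8 ∨ l % 12 = 9 ∨
      l % 12 = 10 ∨ l % 12 = 11 := by omega
  rcases hc with h|h|h|h|h|h|h|h|h|h|h|h <;> rw [h] <;> decide
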